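-- pv_equiv track=rewrite | github.com/dilawar/algorithms | Cluster/cluster_aws.py | cluster_data
-- ===== SOURCE A (Python) =====
-- from collections import Counter
-- import itertools
--
-- def head_and_tail( vec ):
--     head = list(itertools.takewhile(lambda x: x[0] == vec[0][0], vec))
--     return head, vec[len(head):]
--
-- def find_elem_in_vec( vec, pivot ):
--     for i, v in enumerate( vec ):
--         if v[2] == pivot:
--             return i
--     return None
--
-- def cluster_data( vec, result ):
--     if len( vec ) < 1:
--         return result
--
--     cluster, vec = head_and_tail( vec )
--     specs = [ x[2] for x in cluster ]
--     pivotSpec, pivotSpecCount = Counter( specs ).most_common( 1 )[0]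
--     newcluster = [ None ] * len(cluster)
--     for i, e in enumerate(cluster):
--         if e[2] == pivotSpec:
--             newcluster[i] = e
--             continue
--
--         fromI = find_elem_in_vec( vec, pivotSpec )
--         if fromI is None:
--             continue
--
--         newcluster[ i ] = vec[ fromI ]
--         vec.insert( fromI, e )
--         del vec[ fromI ]
--
--     result.append( newcluster )
--     return cluster_data( vec, result )
-- ===== SOURCE B (Python) =====
-- def cluster_data(vec, result):
--     # Iterative rewrite: peel off the leading run of equal first components,
--     # fill non-pivot slots with the single first tail match (A's repeated
--     # find over the unchanged tail always returns the same element).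
--     # Like A, appends the new clusters to `result` in place.
--     rest = vec
--     while len(rest) >= 1:
--         k = rest[0][0]
--         n = 0
--         while n < len(rest) and rest[n][0] == k:
--             n += 1
--         run, rest = rest[:n], rest[n:]
--         counts = {}
--         for x in run:
--             counts[x[2]] = counts.get(x[2], 0) + 1
--         pivot = max(counts, key=counts.get)
--         fill = next((v for v in rest if v[2] == pivot), None)
--         result.append([e if e[2] == pivot else fill for e in run])
--     return result
-- ===== Notes on version B (the rewrite author's own statement) =====
-- stated objective: alternative
-- what changed: Recursion with a per-non-matching-element re-scan of the tail (plus an insert/del no-op) is replaced by an iterative loop that counts specs in one dict pass and finds the single fill element with one scan of the tail per run.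
import Mathlib
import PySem

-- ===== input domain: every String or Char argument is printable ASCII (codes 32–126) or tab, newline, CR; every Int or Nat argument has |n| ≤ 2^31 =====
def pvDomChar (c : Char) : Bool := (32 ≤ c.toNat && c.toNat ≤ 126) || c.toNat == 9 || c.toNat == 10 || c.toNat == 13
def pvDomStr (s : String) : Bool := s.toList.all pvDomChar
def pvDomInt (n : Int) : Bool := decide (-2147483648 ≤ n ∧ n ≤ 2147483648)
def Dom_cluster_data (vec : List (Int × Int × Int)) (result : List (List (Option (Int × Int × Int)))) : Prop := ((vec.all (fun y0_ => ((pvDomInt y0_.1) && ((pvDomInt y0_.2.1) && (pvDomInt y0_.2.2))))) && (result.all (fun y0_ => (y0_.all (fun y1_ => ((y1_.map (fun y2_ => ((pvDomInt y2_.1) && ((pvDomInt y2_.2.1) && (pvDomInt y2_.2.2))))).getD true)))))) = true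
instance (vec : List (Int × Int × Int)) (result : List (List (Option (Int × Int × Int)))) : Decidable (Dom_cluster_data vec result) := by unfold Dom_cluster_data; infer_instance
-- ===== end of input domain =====

-- B replaces A's recursion + per-element tail re-scan + insert/del no-op by one
-- iterative pass that finds the fill element once per run (return value AND the
-- in-place appends to `result` coincide; neither version mutates the caller's vec).


-- ===== PORT A =====

-- head = takewhile(x[0] == vec[0][0]); only called on nonempty vec, where headD is vec[0]
def head_and_tail (vec : List (Int × Int × Int)) :
    List (Int × Int × Int) × List (Int × Int × Int) :=
  let head := vec.takeWhile (fun x => x.1 == (vec.headD (0, 0, 0)).1)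
  (head, vec.drop head.length)

-- for i, v in enumerate(vec): if v[2] == pivot: return i / return None
def find_elem_in_vec (vec : List (Int × Int × Int)) (pivot : Int) : Option Nat :=
  match vec with
  | [] => none
  | v :: rest => if v.2.2 == pivot then some 0 else (find_elem_in_vec rest pivot).map (· + 1)

-- Counter(specs).most_common(1)[0]: the first item (insertion order) with maximal count
def pyMostCommon1 (d : PySem.Dict Int Int) : Int × Int :=
  match d.items with
  | [] => (0, 0)   -- unreachable: the Counter of the nonempty cluster
  | p :: rest => rest.foldl (fun b q => if q.2 > b.2 then q else b) p

-- the 'for i, e in enumerate(cluster)' loop: builds newcluster, threads the mutated vec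
-- (vec[fromI] via getD: the index returned by find_elem_in_vec is always in range)
def clusterLoop (cluster : List (Int × Int × Int)) (pivotSpec : Int)
    (vec : List (Int × Int × Int)) :
    List (Option (Int × Int × Int)) × List (Int × Int × Int) :=
  match cluster with
  | [] => ([], vec)
  | e :: rest =>
    if e.2.2 == pivotSpec then
      let r := clusterLoop rest pivotSpec vec
      (some e :: r.1, r.2)
    else
      match find_elem_in_vec vec pivotSpec with
      | none =>
        let r := clusterLoop rest pivotSpec vec
        (none :: r.1, r.2)
      | some fromI =>
        let filled := vec.getD fromI (0, 0, 0)
        -- vec.insert(fromI, e); del vec[fromI]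
        let vec1 := ((vec.insertIdx fromI e).eraseIdx fromI)
        let r := clusterLoop rest pivotSpec vec1
        (some filled :: r.1, r.2)

-- termination helpers for cluster_data (cited in decreasing_by)
theorem clusterLoop_snd (cluster : List (Int × Int × Int)) (p : Int)
    (vec : List (Int × Int × Int)) : (clusterLoop cluster p vec).2 = vec := by
  induction cluster generalizing vec with
  | nil => rfl
  | cons e rest ih =>
    simp only [clusterLoop]
    split
    · exact ih vec
    · cases hf : find_elem_in_vec vec p with
      | none => simp [ih vec]
      | some i => simp [List.eraseIdx_insertIdx_self, ih]

theorem head_and_tail_lt (vec : List (Int × Int × Int)) (h : vec ≠ []) :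
    (head_and_tail vec).2.length < vec.length := by
  cases vec with
  | nil => simp at h
  | cons x xs =>
    simp only [head_and_tail, List.length_drop, List.takeWhile]
    simp only [List.headD_cons, beq_self_eq_true, List.length_cons]
    omega

def cluster_data (vec : List (Int × Int × Int)) (result : List (List (Option (Int × Int × Int)))) : List (List (Option (Int × Int × Int))) :=
  if vec.length < 1 then result
  else
    let ht := head_and_tail vec
    let specs := ht.1.map (fun x => x.2.2)
    let pivotSpec := (pyMostCommon1 (PySem.Dict.counter specs)).1
    let r := clusterLoop ht.1 pivotSpec ht.2
    cluster_data r.2 (result ++ [r.1])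
termination_by vec.length
decreasing_by
  rename_i h
  simp only [clusterLoop_snd]
  exact head_and_tail_lt vec (by simpa using (by omega : ¬ vec.length < 1))

-- ===== PORT B =====

-- n = 0; while n < len(rest) and rest[n][0] == k: n += 1
def run_len (rest : List (Int × Int × Int)) (k : Int) : Nat :=
  match rest with
  | [] => 0
  | x :: xs => if x.1 == k then run_len xs k + 1 else 0

-- counts = {}; for x in run: counts[x[2]] = counts.get(x[2], 0) + 1
def run_counts (run : List (Int × Int × Int)) : PySem.Dict Int Int :=
  run.foldl (fun d x => d.insert x.2.2 (d.getD x.2.2 0 + 1)) PySem.Dict.empty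

-- max(counts, key=counts.get): first key (insertion order) with maximal count
def pick_pivot (counts : PySem.Dict Int Int) : Int :=
  match counts.keys with
  | [] => 0   -- unreachable: max() of the nonempty counts dict
  | k :: ks => ks.foldl (fun b x => if counts.getD x 0 > counts.getD b 0 then x else b) k

def cluster_data_alt (vec : List (Int × Int × Int)) (result : List (List (Option (Int × Int × Int)))) : List (List (Option (Int × Int × Int))) :=
  match vec with
  | [] => result
  | x :: xs =>
    let n := run_len (x :: xs) x.1
    let run := (x :: xs).take n
    let rest := (x :: xs).drop n
    let pivot := pick_pivot (run_counts run)
    let fill := rest.find? (fun v => v.2.2 == pivot)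
    cluster_data_alt rest (result ++ [run.map (fun e => if e.2.2 == pivot then some e else fill)])
termination_by vec.length
decreasing_by
  simp only [List.length_drop, run_len, beq_self_eq_true, if_true, List.length_cons]
  omega

-- ===== PRECONDITION & SPEC =====
def Spec_cluster_data (vec : List (Int × Int × Int)) (result : List (List (Option (Int × Int × Int)))) (out : List (List (Option (Int × Int × Int)))) : Prop := out = cluster_data_alt vec result
instance (vec : List (Int × Int × Int)) (result : List (List (Option (Int × Int × Int)))) (out : List (List (Option (Int × Int × Int)))) : Decidable (Spec_cluster_data vec result out) := by unfold Spec_cluster_data; infer_instance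

-- ===== CLAIM (what is proved, stated in full; the proofs are below) =====
def Claim_equal_cluster_data : Prop := ∀ (vec : List (Int × Int × Int)) (result : List (List (Option (Int × Int × Int)))), Dom_cluster_data vec result → Spec_cluster_data vec result (cluster_data vec result)

-- ===== LEMMAS AND PROOFS =====

theorem run_len_eq (l : List (Int × Int × Int)) (k : Int) :
    run_len l k = (l.takeWhile (fun x => x.1 == k)).length := by
  induction l with
  | nil => rfl
  | cons x xs ih =>
    simp only [run_len, List.takeWhile]
    cases h : (x.1 == k) <;> simp [ih]

-- find_elem_in_vec against List.find?
theorem find_elem_none (v : List (Int × Int × Int)) (p : Int)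
    (h : find_elem_in_vec v p = none) : v.find? (fun x => x.2.2 == p) = none := by
  induction v with
  | nil => rfl
  | cons x xs ih =>
    simp only [find_elem_in_vec] at h
    rw [List.find?]
    cases hx : (x.2.2 == p) with
    | true => simp [hx] at h
    | false =>
      simp only [hx] at h ⊢
      cases hr : find_elem_in_vec xs p with
      | some j => simp [hr] at h
      | none => exact ih hr

theorem find_elem_some (v : List (Int × Int × Int)) (p : Int) (i : Nat)
    (h : find_elem_in_vec v p = some i) :
    v.find? (fun x => x.2.2 == p) = some (v.getD i (0, 0, 0)) := by
  induction v generalizing i with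
  | nil => simp [find_elem_in_vec] at h
  | cons x xs ih =>
    simp only [find_elem_in_vec] at h
    rw [List.find?]
    cases hx : (x.2.2 == p) with
    | true =>
      simp only [hx] at h ⊢
      cases h
      rfl
    | false =>
      simp only [hx] at h ⊢
      cases hr : find_elem_in_vec xs p with
      | none => simp [hr] at h
      | some j =>
        simp only [hr, Option.map_some] at h
        cases h
        simpa using ih j hr

theorem clusterLoop_fst (c : List (Int × Int × Int)) (p : Int)
    (v : List (Int × Int × Int)) :
    (clusterLoop c p v).1
      = c.map (fun e => if e.2.2 == p then some e else v.find? (fun x => x.2.2 == p)) := by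
  induction c with
  | nil => rfl
  | cons e rest ih =>
    simp only [clusterLoop, List.map]
    cases hx : (e.2.2 == p) with
    | true => simp [ih]
    | false =>
      simp only [Bool.false_eq_true, if_false]
      cases hf : find_elem_in_vec v p with
      | none => simp [find_elem_none v p hf, ih]
      | some i => simp [find_elem_some v p i hf, List.eraseIdx_insertIdx_self, ih]

-- strict-max folds: pairs (A, over Counter items) vs keys (B, over counts.keys)
theorem foldl_max_pairs (f : Int → Nat) (l : List Int) (b : Int) :
    (l.map (fun k => (k, (f k : Int)))).foldl (fun b q => if q.2 > b.2 then q else b) (b, (f b : Int))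
      = (l.foldl (fun b x => if (f x : Int) > (f b : Int) then x else b) b,
         (f (l.foldl (fun b x => if (f x : Int) > (f b : Int) then x else b) b) : Int)) := by
  induction l generalizing b with
  | nil => rfl
  | cons x xs ih =>
    simp only [List.map, List.foldl, gt_iff_lt]
    by_cases h : (f b : Int) < (f x : Int) <;> simp only [h, if_true, if_false] <;> exact ih _

theorem run_counts_eq (run : List (Int × Int × Int)) :
    run_counts run = PySem.Dict.counter (run.map (fun x => x.2.2)) := by
  unfold run_counts
  rw [← PySem.Dict.foldl_insert_getD_add_one_eq_counter, List.foldl_map]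

theorem pivot_eq (run : List (Int × Int × Int)) (h : run ≠ []) :
    (pyMostCommon1 (PySem.Dict.counter (run.map (fun x => x.2.2)))).1
      = pick_pivot (run_counts run) := by
  rw [run_counts_eq]
  cases hs : run.map (fun x => x.2.2) with
  | nil => simp at hs; simp [hs] at h
  | cons s rest =>
    unfold pyMostCommon1 pick_pivot
    rw [PySem.Dict.items_counter, PySem.Dict.keys_counter, PySem.Set.ofList_cons,
      List.map_cons]
    simp only [PySem.Dict.getD_counter]
    have hp := foldl_max_pairs (fun k => (s :: rest).count k)
      (PySem.Set.discard (PySem.Set.ofList rest) s) s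
    simp only at hp ⊢
    rw [hp]

theorem cluster_data_eq_alt_aux (n : Nat) :
    ∀ (vec : List (Int × Int × Int)) (result : List (List (Option (Int × Int × Int)))),
    vec.length ≤ n → cluster_data vec result = cluster_data_alt vec result := by
  induction n with
  | zero =>
    intro vec result hl
    have : vec = [] := List.length_eq_zero_iff.mp (by omega)
    subst this
    rw [cluster_data, cluster_data_alt]
    simp
  | succ n ih =>
    intro vec result hl
    cases vec with
    | nil => rw [cluster_data, cluster_data_alt]; simp
    | cons x xs =>
      rw [cluster_data, cluster_data_alt]
      have hne : ¬ ((x :: xs).length < 1) := by simp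
      rw [if_neg hne]
      have htk : ∀ (l : List (Int × Int × Int)) (p : (Int × Int × Int) → Bool),
          l.take ((l.takeWhile p).length) = l.takeWhile p :=
        fun l p => (List.prefix_iff_eq_take.mp (List.takeWhile_prefix p)).symm
      simp only [head_and_tail, List.headD_cons, run_len_eq, htk,
        clusterLoop_fst, clusterLoop_snd]
      have hcl : (x :: xs).takeWhile (fun e => e.1 == x.1)
          = x :: xs.takeWhile (fun e => e.1 == x.1) := by
        simp
      rw [hcl]
      rw [pivot_eq _ (by simp)]  -- run = x :: … is nonempty
      exact ih _ _ (by simp [List.length_cons] at hl ⊢; omega)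

theorem cluster_data_eq_alt (vec : List (Int × Int × Int))
    (result : List (List (Option (Int × Int × Int)))) :
    cluster_data vec result = cluster_data_alt vec result :=
  cluster_data_eq_alt_aux vec.length vec result (le_refl _)

-- ===== VERDICT (by name: the statement is the Claim_ definition above) =====
theorem cluster_data_spec : Claim_equal_cluster_data := by
  intro vec result _
  unfold Spec_cluster_data
  exact cluster_data_eq_alt vec result
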